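-- pv_equiv track=rewrite | github.com/catowabisabi/meow-code | api_server/services/sandbox/bash_security.py | has_unescaped_char
-- ===== SOURCE A (Python) =====
-- def has_unescaped_char(content: str, char: str) -> bool:
--     """
--     Check if content contains an unescaped occurrence of a single character.
--
--     Handles bash escape sequences correctly where a backslash escapes the
--     following character.
--     """
--     if len(char) != 1:
--         raise ValueError("has_unescaped_char only works with single characters")
--
--     i = 0
--     while i < len(content):
--         if content[i] == "\\" and i + 1 < len(content):
--             i += 2
--             continue
--
--         if content[i] == char:
--             return True
--
--         i += 1
--
--     return False
-- ===== SOURCE B (Python) =====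
-- def has_unescaped_char(content: str, char: str) -> bool:
--     """Occurrence-driven check: jump to each occurrence of char with str.find
--     and decide it by the parity of the backslash run immediately before it
--     (even run = unescaped); a backslash itself counts as unescaped only when
--     it is the final character of the string (an odd trailing run)."""
--     if len(char) != 1:
--         raise ValueError("has_unescaped_char only works with single characters")
--     i = content.find(char)
--     while i != -1:
--         j = i
--         while j > 0 and content[j - 1] == "\\":
--             j -= 1
--         if (i - j) % 2 == 0 and (char != "\\" or i == len(content) - 1):
--             return True
--         i = content.find(char, i + 1)
--     return False
-- ===== Notes on version B (the rewrite author's own statement) =====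
-- stated objective: alternative
-- what changed: B is occurrence-driven: it jumps between occurrences of char with str.find and decides each one by the parity of the backslash run immediately before it (scanned backwards), instead of A's forward scan that consumes backslash-escape pairs.
import Mathlib
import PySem

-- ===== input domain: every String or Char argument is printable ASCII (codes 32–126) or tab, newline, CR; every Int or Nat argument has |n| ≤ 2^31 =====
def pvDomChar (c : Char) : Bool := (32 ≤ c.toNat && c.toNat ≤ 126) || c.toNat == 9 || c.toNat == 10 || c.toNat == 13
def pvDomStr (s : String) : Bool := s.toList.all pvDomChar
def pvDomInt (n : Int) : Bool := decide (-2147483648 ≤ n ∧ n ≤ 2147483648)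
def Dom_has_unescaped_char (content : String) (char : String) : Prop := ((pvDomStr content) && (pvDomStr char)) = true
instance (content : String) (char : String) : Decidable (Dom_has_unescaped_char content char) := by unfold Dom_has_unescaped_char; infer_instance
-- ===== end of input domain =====

-- B replaces A's forward escape-consuming scan by an occurrence-driven search: it jumps
-- between occurrences of char and judges each by the parity of the backslash run before it
-- (alternative decomposition); return values agree wherever A returns (char of length 1).

-- ===== PORT A =====
-- A's while-loop: looks at content[i]; a backslash with a following character ('\\' :: y :: rest)
-- skips two positions; otherwise compare with char; a final lone character (i+1 = len) is compared directly.
def hucLoopA : List Char → Char → Bool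
  | [], _ => false
  | [x], c => x == c
  | x :: y :: rest, c =>
    if x == '\\' then hucLoopA rest c
    else if x == c then true
    else hucLoopA (y :: rest) c

def has_unescaped_char (content : String) (char : String) : Bool :=
  match char.toList with
  | [c] => hucLoopA content.toList c
  | _ => false  -- Python raises ValueError here; excluded by Pre_

-- ===== PORT B =====
-- port of str.find(char, i): index of the first occurrence of c at position ≥ i, none if absent
-- (the loop over positions is encoded structurally with the fuel cs.length - i)
def findIdxFromAux (cs : List Char) (c : Char) : Nat → Nat → Option Nat
  | _, 0 => none
  | i, fuel + 1 =>
    if i < cs.length then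
      if cs.getD i ' ' == c then some i else findIdxFromAux cs c (i + 1) fuel
    else none

def findIdxFrom (cs : List Char) (c : Char) (i : Nat) : Option Nat :=
  findIdxFromAux cs c i (cs.length - i)

-- B's inner while-loop: start of the backslash run ending just before position i
def backStart (cs : List Char) : Nat → Nat
  | 0 => 0
  | j + 1 => if cs.getD j ' ' == '\\' then backStart cs j else j + 1

-- B's outer while-loop over the occurrences of c (fuel bounds the number of iterations)
def huntBAux (cs : List Char) (c : Char) : Nat → Nat → Bool
  | _, 0 => false
  | i, fuel + 1 =>
    match findIdxFrom cs c i with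
    | none => false
    | some k =>
      if (k - backStart cs k) % 2 == 0 && (c != '\\' || k == cs.length - 1) then true
      else huntBAux cs c (k + 1) fuel

def huntB (cs : List Char) (c : Char) (i : Nat) : Bool :=
  huntBAux cs c i (cs.length + 1 - i)

def has_unescaped_char_alt (content : String) (char : String) : Bool :=
  if char.toList.length == 1 then huntB content.toList (char.toList.headD ' ') 0
  else false  -- Python raises ValueError here; excluded by Pre_

-- ===== PRECONDITION & SPEC =====
-- Pre_ excludes exactly the inputs where A raises ValueError (char not a single character).
def Pre_has_unescaped_char (content : String) (char : String) : Prop := PySem.Str.len char = 1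
instance (content : String) (char : String) : Decidable (Pre_has_unescaped_char content char) := by unfold Pre_has_unescaped_char; infer_instance
def pvWitness_has_unescaped_char : String × String := ("echo \\\" hi \"", "\"")

def Spec_has_unescaped_char (content : String) (char : String) (out : Bool) : Prop := out = has_unescaped_char_alt content char
instance (content : String) (char : String) (out : Bool) : Decidable (Spec_has_unescaped_char content char out) := by unfold Spec_has_unescaped_char; infer_instance

-- ===== CLAIM (what is proved, stated in full; the proofs are below) =====
def Claim_equal_has_unescaped_char : Prop := ∀ (content : String) (char : String), Dom_has_unescaped_char content char → Pre_has_unescaped_char content char → Spec_has_unescaped_char content char (has_unescaped_char content char)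

-- ===== LEMMAS AND PROOFS =====

-- both programs decide the same predicate: some position k holds c, is preceded by an
-- even run of backslashes, and (for c = '\\') is the last character
def UnescAt (cs : List Char) (c : Char) (k : Nat) : Prop :=
  k < cs.length ∧ cs.getD k ' ' = c ∧ (k - backStart cs k) % 2 = 0 ∧ (c ≠ '\\' ∨ k + 1 = cs.length)

theorem findIdxFrom_spec (cs : List Char) (c : Char) :
    ∀ fuel i, cs.length ≤ i + fuel →
      (∀ k, findIdxFromAux cs c i fuel = some k →
          i ≤ k ∧ k < cs.length ∧ cs.getD k ' ' = c ∧ ∀ j, i ≤ j → j < k → cs.getD j ' ' ≠ c) ∧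
      (findIdxFromAux cs c i fuel = none → ∀ j, i ≤ j → j < cs.length → cs.getD j ' ' ≠ c) := by
  intro fuel
  induction fuel with
  | zero =>
    intro i hf
    exact ⟨fun k hk => by simp [findIdxFromAux] at hk, fun _ j h1 h2 => by omega⟩
  | succ fuel ih =>
    intro i hf
    by_cases hi : i < cs.length
    · by_cases hc : cs.getD i ' ' == c
      · have hceq : cs.getD i ' ' = c := by simpa using hc
        have hceq2 : cs[i] = c := by
          rwa [List.getD_eq_getElem cs ' ' hi] at hceq
        have hsome : findIdxFromAux cs c i (fuel + 1) = some i := by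
          simp [findIdxFromAux, hi, hceq2]
        refine ⟨fun k hk => ?_, fun hn => ?_⟩
        · rw [hsome, Option.some.injEq] at hk
          subst hk
          exact ⟨Nat.le_refl _, hi, hceq, fun j h1 h2 => by omega⟩
        · rw [hsome] at hn
          exact absurd hn (by simp)
      · have hcne2 : ¬ cs[i] = c := by
          simpa [List.getElem?_eq_getElem hi] using hc
        have hrec : findIdxFromAux cs c i (fuel + 1) = findIdxFromAux cs c (i + 1) fuel := by
          simp [findIdxFromAux, hi, hcne2]
        have ih' := ih (i + 1) (by omega)
        refine ⟨fun k hk => ?_, fun hn j h1 h2 => ?_⟩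
        · rw [hrec] at hk
          obtain ⟨hik, hkl, hkc, hmin⟩ := ih'.1 k hk
          refine ⟨by omega, hkl, hkc, fun j h1 h2 => ?_⟩
          rcases Nat.eq_or_lt_of_le h1 with h | h
          · subst h; simpa using hc
          · exact hmin j h h2
        · rw [hrec] at hn
          rcases Nat.eq_or_lt_of_le h1 with h | h
          · subst h; simpa using hc
          · exact ih'.2 hn j h h2
    · refine ⟨fun k hk => ?_, fun _ j h1 h2 => by omega⟩
      simp [findIdxFromAux, if_neg hi] at hk

theorem findIdxFrom_spec' (cs : List Char) (c : Char) (i : Nat) :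
    (∀ k, findIdxFrom cs c i = some k →
        i ≤ k ∧ k < cs.length ∧ cs.getD k ' ' = c ∧ ∀ j, i ≤ j → j < k → cs.getD j ' ' ≠ c) ∧
    (findIdxFrom cs c i = none → ∀ j, i ≤ j → j < cs.length → cs.getD j ' ' ≠ c) :=
  findIdxFrom_spec cs c (cs.length - i) i (by omega)

theorem backStart_le (cs : List Char) : ∀ k, backStart cs k ≤ k
  | 0 => Nat.le_refl 0
  | k + 1 => by
    unfold backStart
    split
    · exact Nat.le_trans (backStart_le cs k) (Nat.le_succ k)
    · exact Nat.le_refl _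

theorem backStart_shift (x : Char) (cs : List Char) :
    ∀ k, backStart (x :: cs) (k + 1) =
      if backStart cs k = 0 then (if x = '\\' then 0 else 1) else backStart cs k + 1
  | 0 => by
    by_cases hx : x = '\\' <;> simp [backStart, hx]
  | k + 1 => by
    have ih := backStart_shift x cs k
    show (if (x :: cs).getD (k + 1) ' ' == '\\' then backStart (x :: cs) (k + 1) else k + 2) = _
    have hg : (x :: cs).getD (k + 1) ' ' = cs.getD k ' ' := by simp
    rw [hg]
    show _ = (if (if cs.getD k ' ' == '\\' then backStart cs k else k + 1) = 0 then _ else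
      (if cs.getD k ' ' == '\\' then backStart cs k else k + 1) + 1)
    by_cases hc : cs.getD k ' ' == '\\'
    · simp only [hc, if_true, ih]
    · simp only [hc, if_false, Bool.false_eq_true]
      have : ¬ (k + 1 = 0) := by omega
      simp

theorem gap_shift1 (x : Char) (hx : x ≠ '\\') (cs : List Char) (k : Nat) :
    (k + 1) - backStart (x :: cs) (k + 1) = k - backStart cs k := by
  have h := backStart_shift x cs k
  have hle := backStart_le cs k
  by_cases hb : backStart cs k = 0 <;> simp [hb, hx] at h <;> omega

theorem gap_shift2 (y : Char) (cs : List Char) (k : Nat) :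
    ((k + 2) - backStart ('\\' :: y :: cs) (k + 2)) % 2 = (k - backStart cs k) % 2 := by
  have h1 := backStart_shift y cs k
  have h2 : backStart ('\\' :: y :: cs) (k + 2) =
      if backStart (y :: cs) (k + 1) = 0 then 0 else backStart (y :: cs) (k + 1) + 1 := by
    simpa using backStart_shift '\\' (y :: cs) (k + 1)
  have hle := backStart_le cs k
  by_cases hb : backStart cs k = 0
  · by_cases hy : y = '\\'
    · rw [hb, if_pos rfl, if_pos hy] at h1
      rw [h1, if_pos rfl] at h2
      omega
    · rw [hb, if_pos rfl, if_neg hy] at h1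
      rw [h1] at h2
      simp only [Nat.one_ne_zero, if_false] at h2
      omega
  · rw [if_neg hb] at h1
    rw [h1] at h2
    simp only [Nat.succ_ne_zero, if_false] at h2
    omega

theorem backStart_one (x : Char) (cs : List Char) (hx : x = '\\') :
    backStart (x :: cs) 1 = 0 := by
  simp [backStart, hx]

theorem hucLoopA_iff (c : Char) : ∀ cs, hucLoopA cs c = true ↔ ∃ k, UnescAt cs c k
  | [] => by
    simp [hucLoopA, UnescAt]
  | [x] => by
    simp only [hucLoopA, beq_iff_eq, UnescAt]
    constructor
    · intro h
      exact ⟨0, by simp [h, backStart]⟩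
    · rintro ⟨k, hk, h1, -, -⟩
      have hk0 : k = 0 := by simp at hk; omega
      subst hk0
      simpa using h1
  | x :: y :: rest => by
    by_cases hx : x = '\\'
    · have ih := hucLoopA_iff c rest
      simp only [hucLoopA, hx, beq_self_eq_true, if_true, ih, UnescAt]
      constructor
      · rintro ⟨k, hk, h1, h2, h3⟩
        refine ⟨k + 2, by simp only [List.length_cons] at hk ⊢; omega, by simpa using h1, ?_, ?_⟩
        · rw [gap_shift2]; exact h2
        · rcases h3 with h | h
          · exact Or.inl h
          · right; simp only [List.length_cons] at h ⊢; omega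
      · rintro ⟨k, hk, h1, h2, h3⟩
        rcases k with _ | _ | k
        · exfalso
          simp only [List.getD_cons_zero] at h1
          rcases h3 with h | h
          · exact h h1.symm
          · simp only [List.length_cons] at h; omega
        · exfalso
          rw [backStart_one '\\' (y :: rest) rfl] at h2
          simp at h2
        · refine ⟨k, by simp only [List.length_cons] at hk ⊢; omega, by simpa using h1, ?_, ?_⟩
          · rw [gap_shift2] at h2; exact h2
          · rcases h3 with h | h
            · exact Or.inl h
            · right; simp only [List.length_cons] at h ⊢; omega
    · by_cases hc : x = c
      · have hxb : (x == '\\') = false := by simp [hx]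
        have hcb : (x == c) = true := by simp [hc]
        simp only [hucLoopA, hxb, Bool.false_eq_true, if_false, hcb, if_true, true_iff]
        refine ⟨0, ?_⟩
        unfold UnescAt
        exact ⟨by simp, by simpa using hc, by simp [backStart], Or.inl (hc ▸ hx)⟩
      · have ih := hucLoopA_iff c (y :: rest)
        have hxb : (x == '\\') = false := by simp [hx]
        have hcb : (x == c) = false := by simp [hc]
        simp only [hucLoopA, hxb, hcb, Bool.false_eq_true, if_false, ih, UnescAt]
        constructor
        · rintro ⟨k, hk, h1, h2, h3⟩
          refine ⟨k + 1, by simp only [List.length_cons] at hk ⊢; omega, by simpa using h1, ?_, ?_⟩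
          · rw [gap_shift1 x hx]; exact h2
          · rcases h3 with h | h
            · exact Or.inl h
            · right; simp only [List.length_cons] at h ⊢; omega
        · rintro ⟨k, hk, h1, h2, h3⟩
          rcases k with _ | k
          · exfalso
            simp at h1
            exact hc h1
          · refine ⟨k, by simp only [List.length_cons] at hk ⊢; omega, by simpa using h1, ?_, ?_⟩
            · rw [gap_shift1 x hx] at h2; exact h2
            · rcases h3 with h | h
              · exact Or.inl h
              · right; simp only [List.length_cons] at h ⊢; omega

theorem huntBAux_iff (cs : List Char) (c : Char) :
    ∀ fuel i, cs.length + 1 ≤ i + fuel →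
      (huntBAux cs c i fuel = true ↔ ∃ k, i ≤ k ∧ UnescAt cs c k) := by
  intro fuel
  induction fuel with
  | zero =>
    intro i hf
    simp only [huntBAux, Bool.false_eq_true, false_iff]
    rintro ⟨k, hik, hk, -, -, -⟩
    omega
  | succ fuel ih =>
    intro i hf
    cases h : findIdxFrom cs c i with
    | none =>
      simp only [huntBAux, h, Bool.false_eq_true, false_iff]
      rintro ⟨k, hik, hk, h1, -, -⟩
      exact (findIdxFrom_spec' cs c i).2 h k hik hk h1
    | some k =>
      obtain ⟨hik, hklen, hkc, hmin⟩ := (findIdxFrom_spec' cs c i).1 k h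
      by_cases hcond : ((k - backStart cs k) % 2 == 0 && (c != '\\' || k == cs.length - 1)) = true
      · simp only [huntBAux, h, hcond, if_true, true_iff]
        simp only [Bool.and_eq_true, beq_iff_eq, Bool.or_eq_true, bne_iff_ne, ne_eq] at hcond
        refine ⟨k, hik, hklen, hkc, hcond.1, ?_⟩
        rcases hcond.2 with hne | heq
        · exact Or.inl hne
        · right; omega
      · have hrec : huntBAux cs c i (fuel + 1) = huntBAux cs c (k + 1) fuel := by
          simp [huntBAux, h, hcond]
        rw [hrec, ih (k + 1) (by omega)]
        constructor
        · rintro ⟨k', hk', hu⟩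
          exact ⟨k', by omega, hu⟩
        · rintro ⟨k', hik', hk'len, h1, h2, h3⟩
          refine ⟨k', ?_, hk'len, h1, h2, h3⟩
          by_contra hlt
          rcases Nat.lt_or_ge k' k with hl | hg
          · exact hmin k' hik' hl h1
          · have hkk : k' = k := by omega
            subst hkk
            apply hcond
            simp only [Bool.and_eq_true, beq_iff_eq, Bool.or_eq_true, bne_iff_ne, ne_eq]
            refine ⟨h2, ?_⟩
            rcases h3 with hne | heq
            · exact Or.inl hne
            · right; omega

theorem huntB_iff (cs : List Char) (c : Char) (i : Nat) :
    huntB cs c i = true ↔ ∃ k, i ≤ k ∧ UnescAt cs c k :=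
  huntBAux_iff cs c (cs.length + 1 - i) i (by omega)

theorem loops_agree (cs : List Char) (c : Char) : hucLoopA cs c = huntB cs c 0 := by
  have h1 := hucLoopA_iff c cs
  have h2 := huntB_iff cs c 0
  have : hucLoopA cs c = true ↔ huntB cs c 0 = true := by
    rw [h1, h2]
    constructor
    · rintro ⟨k, hk⟩; exact ⟨k, Nat.zero_le k, hk⟩
    · rintro ⟨k, -, hk⟩; exact ⟨k, hk⟩
  cases hA : hucLoopA cs c <;> cases hB : huntB cs c 0 <;> simp_all

-- ===== VERDICT (by name: the statement is the Claim_ definition above) =====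
theorem has_unescaped_char_spec : Claim_equal_has_unescaped_char := by
  intro content char _ hpre
  unfold Spec_has_unescaped_char has_unescaped_char has_unescaped_char_alt
  have hlen : char.toList.length = 1 := by
    have := hpre
    simp only [Pre_has_unescaped_char, PySem.Str.len_eq] at this
    omega
  cases h : char.toList with
  | nil => simp [h] at hlen
  | cons c rest =>
    cases rest with
    | nil => simpa [h] using loops_agree content.toList c
    | cons _ _ => simp [h] at hlen
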